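-- pv_equiv track=rewrite | github.com/Asionm/carbonpilot | utils/ifc_extractor.py | is_mesh_closed
-- ===== SOURCE A (Python) =====
-- from collections import defaultdict
--
-- def is_mesh_closed(faces):
--     """
--     Check if triangle mesh is closed (watertight-ish) by edge counting.
--     faces: (n,3) int
--     """
--     edge_count = defaultdict(int)
--     for a, b, c in faces:
--         edges = ((a, b), (b, c), (c, a))
--         for u, v in edges:
--             if u > v:
--                 u, v = v, u
--             edge_count[(u, v)] += 1
--     return all(v == 2 for v in edge_count.values()) if edge_count else False
-- ===== SOURCE B (Python) =====
-- def is_mesh_closed(faces):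
--     """
--     Check if triangle mesh is closed (watertight-ish) by edge counting.
--     faces: (n,3) int
--     """
--     edges = []
--     for a, b, c in faces:
--         for u, v in ((a, b), (b, c), (c, a)):
--             edges.append((u, v) if u <= v else (v, u))
--     if not edges:
--         return False
--     edges.sort()
--     n = len(edges)
--     i = 0
--     while i < n:
--         if i + 1 >= n or edges[i + 1] != edges[i]:
--             return False
--         if i + 2 < n and edges[i + 2] == edges[i]:
--             return False
--         i += 2
--     return True
-- ===== Notes on version B (the rewrite author's own statement) =====
-- stated objective: alternative
-- what changed: Replaces A's defaultdict edge-count hash map and final all-values scan by flattening the normalized edges into one list, sorting it, and scanning the sorted list in steps of two to check it consists of distinct runs of exactly two equal edges.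
import Mathlib
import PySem

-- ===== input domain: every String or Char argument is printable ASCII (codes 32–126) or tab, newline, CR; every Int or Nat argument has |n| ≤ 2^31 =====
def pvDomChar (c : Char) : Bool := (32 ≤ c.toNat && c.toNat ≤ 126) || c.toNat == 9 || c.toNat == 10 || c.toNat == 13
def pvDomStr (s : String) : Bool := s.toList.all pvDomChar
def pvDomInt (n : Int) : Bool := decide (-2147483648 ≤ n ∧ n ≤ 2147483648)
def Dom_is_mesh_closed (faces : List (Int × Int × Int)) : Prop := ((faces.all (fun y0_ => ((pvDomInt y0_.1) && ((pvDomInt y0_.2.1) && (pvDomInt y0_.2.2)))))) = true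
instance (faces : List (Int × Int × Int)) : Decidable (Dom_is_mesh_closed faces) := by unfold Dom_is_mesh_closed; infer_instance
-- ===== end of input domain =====

-- B replaces A's hash-map edge counting by sort-then-scan: it flattens the normalized
-- edges into a list, sorts it, and checks the sorted list is consecutive pairs of equal
-- edges with distinct runs (objective: alternative algorithm, similar cost).

-- ===== PORT A =====
-- A's per-face body: the three edges, each swapped to (min, max), counted in the dict
def pvStepA (d : PySem.Dict (Int × Int) Int) (f : Int × Int × Int) : PySem.Dict (Int × Int) Int :=
  [(f.1, f.2.1), (f.2.1, f.2.2), (f.2.2, f.1)].foldl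
    (fun d uv =>
      let e := if uv.1 > uv.2 then (uv.2, uv.1) else uv
      d.insert e (d.getD e 0 + 1)) d

def is_mesh_closed (faces : List (Int × Int × Int)) : Bool :=
  let edge_count := faces.foldl pvStepA PySem.Dict.empty
  if edge_count.size ≠ 0 then edge_count.values.all (fun v => v == 2) else false

-- ===== PORT B =====
def pvNormB (uv : Int × Int) : Int × Int := if uv.1 ≤ uv.2 then uv else (uv.2, uv.1)

-- B's edge-gathering loop (append the normalized edge for each of the three sides)
def pvEdgesB (faces : List (Int × Int × Int)) : List (Int × Int) :=
  faces.foldl (fun acc f =>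
    [(f.1, f.2.1), (f.2.1, f.2.2), (f.2.2, f.1)].foldl (fun acc uv => acc ++ [pvNormB uv]) acc) []

-- B's while loop over the sorted list, stepping i by 2 = structural recursion dropping two
def pvPairedRuns : List (Int × Int) → Bool
  | [] => true
  | [_] => false
  | x :: y :: rest =>
    if x ≠ y then false
    else match rest with
      | [] => true
      | z :: _ => if z = x then false else pvPairedRuns rest

def is_mesh_closed_alt (faces : List (Int × Int × Int)) : Bool :=
  let edges := pvEdgesB faces
  if edges = [] then false
  else pvPairedRuns (PySem.List.sorted2 edges (·.1) (·.2) false)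

-- ===== PRECONDITION & SPEC =====
def Spec_is_mesh_closed (faces : List (Int × Int × Int)) (out : Bool) : Prop := out = is_mesh_closed_alt faces
instance (faces : List (Int × Int × Int)) (out : Bool) : Decidable (Spec_is_mesh_closed faces out) := by unfold Spec_is_mesh_closed; infer_instance

-- ===== CLAIM (what is proved, stated in full; the proofs are below) =====
def Claim_equal_is_mesh_closed : Prop := ∀ (faces : List (Int × Int × Int)), Dom_is_mesh_closed faces → Spec_is_mesh_closed faces (is_mesh_closed faces)

-- ===== LEMMAS AND PROOFS =====

-- the flat edge list both programs are about
def pvEdges3 (f : Int × Int × Int) : List (Int × Int) :=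
  [pvNormB (f.1, f.2.1), pvNormB (f.2.1, f.2.2), pvNormB (f.2.2, f.1)]

def pvEdges (faces : List (Int × Int × Int)) : List (Int × Int) :=
  faces.flatMap pvEdges3

theorem pvStepA_eq (d : PySem.Dict (Int × Int) Int) (f : Int × Int × Int) :
    pvStepA d f = (pvEdges3 f).foldl (fun d e => d.insert e (d.getD e 0 + 1)) d := by
  simp only [pvStepA, pvEdges3, pvNormB, List.foldl]
  split_ifs <;> first | rfl | omega

theorem pvDictA_eq (faces : List (Int × Int × Int)) (d : PySem.Dict (Int × Int) Int) :
    faces.foldl pvStepA d = (pvEdges faces).foldl (fun d e => d.insert e (d.getD e 0 + 1)) d := by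
  induction faces generalizing d with
  | nil => rfl
  | cons f t ih => simp [pvEdges, List.foldl, pvStepA_eq, ih, List.foldl_append]

theorem pvDictA_counter (faces : List (Int × Int × Int)) :
    faces.foldl pvStepA PySem.Dict.empty = PySem.Dict.counter (pvEdges faces) := by
  rw [pvDictA_eq]; exact PySem.Dict.foldl_insert_getD_add_one_eq_counter _

theorem pvEdgesB_gen (faces : List (Int × Int × Int)) (acc : List (Int × Int)) :
    faces.foldl (fun acc f =>
      [(f.1, f.2.1), (f.2.1, f.2.2), (f.2.2, f.1)].foldl (fun acc uv => acc ++ [pvNormB uv]) acc) acc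
      = acc ++ pvEdges faces := by
  induction faces generalizing acc with
  | nil => simp [pvEdges]
  | cons f t ih =>
    rw [List.foldl_cons, ih]
    simp [pvEdges, pvEdges3, List.foldl, List.append_assoc]

theorem pvEdgesB_eq (faces : List (Int × Int × Int)) : pvEdgesB faces = pvEdges faces := by
  unfold pvEdgesB
  rw [pvEdgesB_gen]
  simp

-- lexicographic order on edges (Python's tuple comparison)
def pvLE (a b : Int × Int) : Prop := a.1 < b.1 ∨ (a.1 = b.1 ∧ a.2 ≤ b.2)

theorem pvLE_trans {a b c : Int × Int} (h1 : pvLE a b) (h2 : pvLE b c) : pvLE a c := by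
  unfold pvLE at *; omega

theorem pvLE_antisymm {a b : Int × Int} (h1 : pvLE a b) (h2 : pvLE b a) : a = b := by
  unfold pvLE at *
  obtain ⟨x1, x2⟩ := a; obtain ⟨y1, y2⟩ := b
  simp only [Prod.mk.injEq]; constructor <;> omega

def pvLt (a b : Int × Int) : Bool :=
  decide (a.1 < b.1) || (!decide (b.1 < a.1) && decide (a.2 < b.2))

theorem pvLt_true {a b : Int × Int} (h : pvLt a b = true) : pvLE a b := by
  unfold pvLt at h; unfold pvLE; simp at h; omega

theorem pvLt_false {a b : Int × Int} (h : pvLt a b = false) : pvLE b a := by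
  unfold pvLt at h; unfold pvLE; simp at h; omega

theorem pvInsertBy_pairwise (x : Int × Int) (ys : List (Int × Int))
    (h : ys.Pairwise pvLE) :
    (PySem.List.insertBy pvLt x ys).Pairwise pvLE := by
  induction ys with
  | nil => simp [PySem.List.insertBy]
  | cons y t ih =>
    rw [List.pairwise_cons] at h
    by_cases hlt : pvLt x y = true
    · rw [PySem.List.insertBy, if_pos hlt]
      refine List.Pairwise.cons ?_ (List.Pairwise.cons h.1 h.2)
      intro w hw
      rcases List.mem_cons.mp hw with rfl | hw
      · exact pvLt_true hlt
      · exact pvLE_trans (pvLt_true hlt) (h.1 w hw)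
    · rw [PySem.List.insertBy, if_neg hlt]
      refine List.Pairwise.cons ?_ (ih h.2)
      intro w hw
      rcases (PySem.List.mem_insertBy pvLt x w t).mp hw with rfl | hw
      · exact pvLt_false (Bool.eq_false_iff.mpr hlt)
      · exact h.1 w hw

theorem pvFoldl_insertBy_pairwise (xs acc : List (Int × Int)) (h : acc.Pairwise pvLE) :
    (xs.foldl (fun acc x => PySem.List.insertBy pvLt x acc) acc).Pairwise pvLE := by
  induction xs generalizing acc with
  | nil => exact h
  | cons x t ih => exact ih _ (pvInsertBy_pairwise x acc h)

theorem pvSorted2_pairwise (xs : List (Int × Int)) :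
    (PySem.List.sorted2 xs (·.1) (·.2) false).Pairwise pvLE := by
  have : PySem.List.sorted2 xs (·.1) (·.2) false
      = xs.foldl (fun acc x => PySem.List.insertBy pvLt x acc) [] := rfl
  rw [this]
  exact pvFoldl_insertBy_pairwise xs [] (by simp)

theorem pvPairedRuns_iff (ss : List (Int × Int)) (h : ss.Pairwise pvLE) :
    pvPairedRuns ss = true ↔ ∀ x ∈ ss, ss.count x = 2 := by
  induction ss using pvPairedRuns.induct with
  | case1 => simp [pvPairedRuns]
  | case2 head =>
    simp [pvPairedRuns]
  | case3 x y rest hxy =>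
    have hres : pvPairedRuns (x :: y :: rest) = false := by
      rcases rest with _ | ⟨z, t⟩ <;> simp [pvPairedRuns, hxy]
    rw [hres]
    simp only [Bool.false_eq_true, false_iff]
    intro hc
    rw [List.pairwise_cons] at h
    have hx := hc x (by simp)
    rw [List.count_cons_self] at hx
    have hmem : x ∈ y :: rest := List.count_pos_iff.mp (by omega)
    have hyx : pvLE y x := by
      rcases List.mem_cons.mp hmem with rfl | hw
      · exact absurd rfl hxy
      · rcases List.pairwise_cons.mp h.2 with ⟨hy, _⟩
        exact hy x hw
    exact hxy (pvLE_antisymm (h.1 y (by simp)) hyx)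
  | case4 x y h4 =>
    rw [not_not] at h4; subst h4
    have hres : pvPairedRuns [x, x] = true := by simp [pvPairedRuns]
    rw [hres]
    simp only [true_iff]
    intro w hw
    rcases List.mem_cons.mp hw with rfl | hw
    · simp
    · rcases List.mem_cons.mp hw with rfl | hw
      · simp
      · simp at hw
  | case5 y z tail h5 =>
    have h5' : z = y := not_not.mp h5
    subst h5'
    have hres : pvPairedRuns (z :: z :: z :: tail) = false := by simp [pvPairedRuns]
    rw [hres]
    simp only [Bool.false_eq_true, false_iff]
    intro hc
    have := hc z (by simp)
    simp at this
  | case6 x y h6 z tail hzx ih =>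
    rw [not_not] at h6; subst h6
    have hres : pvPairedRuns (x :: x :: z :: tail) = pvPairedRuns (z :: tail) := by
      simp [pvPairedRuns, hzx]
    rw [hres]
    rw [List.pairwise_cons] at h
    rcases List.pairwise_cons.mp h.2 with ⟨hxall, hrest⟩
    have hxnot : x ∉ z :: tail := by
      intro hmem
      rcases List.mem_cons.mp hmem with rfl | hw
      · exact hzx rfl
      · rcases List.pairwise_cons.mp hrest with ⟨hz2, _⟩
        have hxz : pvLE x z := hxall z (by simp)
        have hzw : pvLE z x := hz2 x hw
        exact hzx (pvLE_antisymm hzw hxz)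
    rw [ih hrest]
    constructor
    · intro hc w hw
      rcases List.mem_cons.mp hw with rfl | hw
      · rw [List.count_cons_self, List.count_cons_self,
            List.count_eq_zero_of_not_mem hxnot]
      · rcases List.mem_cons.mp hw with rfl | hw2
        · rw [List.count_cons_self, List.count_cons_self,
              List.count_eq_zero_of_not_mem hxnot]
        · have hwx : w ≠ x := fun he => hxnot (he ▸ hw2)
          rw [List.count_cons_of_ne (Ne.symm hwx), List.count_cons_of_ne (Ne.symm hwx)]
          exact hc w hw2
    · intro hc w hw
      have hwx : w ≠ x := fun he => hxnot (he ▸ hw)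
      have := hc w (by simp [hw])
      rwa [List.count_cons_of_ne (Ne.symm hwx), List.count_cons_of_ne (Ne.symm hwx)] at this

theorem pvOfList_eq_nil_iff (xs : List (Int × Int)) : PySem.Set.ofList xs = [] ↔ xs = [] := by
  constructor
  · intro h
    by_contra hne
    rcases List.exists_mem_of_ne_nil xs hne with ⟨x, hx⟩
    have : x ∈ PySem.Set.ofList xs := (PySem.Set.mem_ofList _ _).mpr hx
    simp [h] at this
  · intro h; simp [h, PySem.Set.ofList_nil]

-- ===== VERDICT (by name: the statement is the Claim_ definition above) =====
theorem is_mesh_closed_spec : Claim_equal_is_mesh_closed := by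
  intro faces _
  unfold Spec_is_mesh_closed
  unfold is_mesh_closed is_mesh_closed_alt
  rw [pvDictA_counter, pvEdgesB_eq]
  set es := pvEdges faces with hes
  by_cases hnil : es = []
  · rw [hnil]
    simp [PySem.Dict.size, PySem.Dict.items_counter, PySem.Set.ofList_nil]
  · have hsize : (PySem.Dict.counter es).size ≠ 0 := by
      simp only [PySem.Dict.size, PySem.Dict.items_counter, List.length_map]
      simp only [ne_eq, List.length_eq_zero_iff]
      intro h; exact hnil (pvOfList_eq_nil_iff es |>.mp h)
    rw [if_pos hsize, if_neg hnil]
    set ss := PySem.List.sorted2 es (·.1) (·.2) false with hss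
    have hperm : ss.Perm es := PySem.List.sorted2_perm es _ _ false
    have hpw : ss.Pairwise pvLE := pvSorted2_pairwise es
    have hiff := pvPairedRuns_iff ss hpw
    -- left side: all values of the counter are 2
    have hvals : (PySem.Dict.counter es).values.all (fun v => v == 2)
        = (PySem.Set.ofList es).all (fun k => (es.count k : Int) == 2) := by
      simp [PySem.Dict.values, PySem.Dict.items_counter, List.all_map, Function.comp_def]
    rw [hvals]
    by_cases hall : ∀ x ∈ es, es.count x = 2
    · have h1 : (PySem.Set.ofList es).all (fun k => (es.count k : Int) == 2) = true := by
        rw [List.all_eq_true]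
        intro k hk
        have := hall k ((PySem.Set.mem_ofList _ _).mp hk)
        simp [this]
      have h2 : pvPairedRuns ss = true := by
        rw [hiff]
        intro x hx
        rw [hperm.count_eq]
        exact hall x (hperm.mem_iff.mp hx)
      rw [h1, h2]
    · have h1 : (PySem.Set.ofList es).all (fun k => (es.count k : Int) == 2) = false := by
        rw [List.all_eq_false]
        push Not at hall
        rcases hall with ⟨x, hx, hcx⟩
        refine ⟨x, (PySem.Set.mem_ofList _ _).mpr hx, ?_⟩
        simpa using fun h => hcx (by exact_mod_cast h)
      have h2 : pvPairedRuns ss = false := by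
        rw [Bool.eq_false_iff]
        intro htrue
        apply hall
        intro x hx
        rw [← hperm.count_eq]
        exact (hiff.mp htrue) x (hperm.mem_iff.mpr hx)
      rw [h1, h2]
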